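-- pv_equiv track=rewrite | github.com/Beto312/Dessoftexercicio2 | funcoes.py | calcula_pontos_quina
-- ===== SOURCE A (Python) =====
-- def calcula_pontos_quina(dados):
--     contagem = {}
--     for valor in dados:
--         if valor in contagem:
--             contagem[valor] += 1
--         else:
--             contagem[valor] = 1
--
--     for quantidade in contagem.values():
--         if quantidade >= 5:
--             return 50
--
--     return 0
-- ===== SOURCE B (Python) =====
-- def calcula_pontos_quina(dados):
--     run = 0
--     prev = None
--     for v in sorted(dados):
--         if prev is not None and v == prev:
--             run += 1
--         else:
--             prev = v
--             run = 1
--         if run >= 5: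
--             return 50
--     return 0
-- ===== Notes on version B (the rewrite author's own statement) =====
-- stated objective: alternative
-- what changed: Replaces A's build-a-frequency-dict-then-scan-its-values approach with sort-then-scan: sort the list and detect a run of 5 equal consecutive values with a single-pass run-length counter and early exit.
import Mathlib
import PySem

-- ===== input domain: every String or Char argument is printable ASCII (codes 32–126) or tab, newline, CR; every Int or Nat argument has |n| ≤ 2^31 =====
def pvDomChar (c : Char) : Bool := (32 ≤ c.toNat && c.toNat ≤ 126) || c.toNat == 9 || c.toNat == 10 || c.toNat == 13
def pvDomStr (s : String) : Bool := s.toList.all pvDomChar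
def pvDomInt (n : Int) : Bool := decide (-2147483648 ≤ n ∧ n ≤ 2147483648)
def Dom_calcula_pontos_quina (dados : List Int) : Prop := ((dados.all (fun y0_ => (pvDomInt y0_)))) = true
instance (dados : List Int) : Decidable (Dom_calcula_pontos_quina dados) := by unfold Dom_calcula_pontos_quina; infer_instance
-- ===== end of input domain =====

-- B replaces A's frequency-dict-then-scan with sort-then-scan: detect a run of 5 equal
-- consecutive values in the sorted list (alternative algorithm, same return value).

-- ===== PORT A =====
-- the early-return scan of contagem.values()
def pvLoopQuina : List Int → Int
  | [] => 0
  | q :: rest => if q ≥ 5 then 50 else pvLoopQuina rest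

def calcula_pontos_quina (dados : List Int) : Int :=
  let contagem := dados.foldl
    (fun d v => if d.contains v then d.insert v (d.getD v 0 + 1) else d.insert v 1)
    PySem.Dict.empty
  pvLoopQuina contagem.values

-- ===== PORT B =====
-- the for-loop over sorted(dados) with state (prev, run) and early return
def pvRunLoop : List Int → Option Int → Int → Int
  | [], _, _ => 0
  | v :: rest, prev, run =>
      let run' := if prev = some v then run + 1 else 1
      if run' ≥ 5 then 50 else pvRunLoop rest (some v) run'

def calcula_pontos_quina_alt (dados : List Int) : Int :=
  pvRunLoop (PySem.List.sorted dados (fun x => x) false) none 0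

-- ===== PRECONDITION & SPEC =====
def Spec_calcula_pontos_quina (dados : List Int) (out : Int) : Prop := out = calcula_pontos_quina_alt dados
instance (dados : List Int) (out : Int) : Decidable (Spec_calcula_pontos_quina dados out) := by unfold Spec_calcula_pontos_quina; infer_instance

-- ===== CLAIM (what is proved, stated in full; the proofs are below) =====
def Claim_equal_calcula_pontos_quina : Prop := ∀ (dados : List Int), Dom_calcula_pontos_quina dados → Spec_calcula_pontos_quina dados (calcula_pontos_quina dados)

-- ===== LEMMAS AND PROOFS =====

-- A's if/else counting loop builds exactly Counter(dados)
theorem pvFold_eq (dados : List Int) : ∀ d : PySem.Dict Int Int,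
    dados.foldl (fun d v => if d.contains v then d.insert v (d.getD v 0 + 1) else d.insert v 1) d
      = dados.foldl (fun d x => d.insert x (d.getD x 0 + 1)) d := by
  induction dados with
  | nil => intro d; rfl
  | cons v rest ih =>
      intro d
      simp only [List.foldl_cons]
      by_cases h : d.contains v = true
      · rw [if_pos h]; exact ih _
      · have h0 : d.getD v 0 = 0 := PySem.Dict.getD_of_not_contains d 0 (by simpa using h)
        rw [if_neg h, h0]
        exact ih _

theorem pvLoopQuina_eq (l : List Int) :
    pvLoopQuina l = if l.any (fun q => 5 ≤ q) then 50 else 0 := by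
  induction l with
  | nil => rfl
  | cons q rest ih =>
      simp only [pvLoopQuina, List.any_cons, ih]
      by_cases h : 5 ≤ q
      · simp [h]
      · simp [h]

-- A computes: 50 iff some value of dados has count ≥ 5
theorem pvA_eq (dados : List Int) :
    calcula_pontos_quina dados
      = if dados.any (fun v => 5 ≤ dados.count v) then 50 else 0 := by
  unfold calcula_pontos_quina
  rw [pvFold_eq, PySem.Dict.foldl_insert_getD_add_one_eq_counter, pvLoopQuina_eq]
  have hv : (PySem.Dict.counter dados).values
      = (PySem.Set.ofList dados).map (fun k => (dados.count k : Int)) := by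
    have := PySem.Dict.items_counter (xs := dados)
    simp [PySem.Dict.values, this]
  rw [hv, List.any_map]
  have hany : List.any (PySem.Set.ofList dados) ((fun q => decide (5 ≤ q)) ∘ fun k => ((dados.count k : Int)))
      = dados.any (fun v => decide (5 ≤ dados.count v)) := by
    rw [Bool.eq_iff_iff]
    simp only [List.any_eq_true, Function.comp]
    constructor
    · rintro ⟨x, hx, hc⟩
      exact ⟨x, (PySem.Set.mem_ofList _ _).1 hx, by simpa using hc⟩
    · rintro ⟨x, hx, hc⟩
      exact ⟨x, (PySem.Set.mem_ofList _ _).2 hx, by simpa using hc⟩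
  rw [hany]

-- consuming a block of k copies of p from state (some p, r) with r < 5
theorem pvRun_consume (k : Nat) : ∀ (l : List Int) (p : Int) (r : Int), r < 5 →
    pvRunLoop (List.replicate k p ++ l) (some p) r
      = if 5 ≤ r + (k : Int) then 50 else pvRunLoop l (some p) (r + (k : Int)) := by
  induction k with
  | zero =>
      intro l p r hr
      simp only [List.replicate_zero, List.nil_append, Nat.cast_zero, add_zero]
      rw [if_neg (by omega)]
  | succ k ih =>
      intro l p r hr
      have hstep : pvRunLoop (List.replicate (k + 1) p ++ l) (some p) r
          = if r + 1 ≥ 5 then 50 else pvRunLoop (List.replicate k p ++ l) (some p) (r + 1) := by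
        norm_num [List.replicate_succ, pvRunLoop]
      rw [hstep]
      by_cases h : (5 : Int) ≤ r + 1
      · rw [if_pos h, if_pos (by push_cast; omega)]
      · rw [if_neg h, ih l p (r + 1) (by omega)]
        have h1 : r + 1 + (k : Int) = r + ((k : Nat) + 1 : Nat) := by push_cast; ring
        rw [h1]

-- when the remembered value does not occur, the carried state is irrelevant
theorem pvRun_reset (l : List Int) (p : Int) (r : Int) (h : p ∉ l) :
    pvRunLoop l (some p) r = pvRunLoop l none 0 := by
  cases l with
  | nil => rfl
  | cons w t =>
      have hw : p ≠ w := fun e => h (e ▸ List.mem_cons_self)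
      norm_num [pvRunLoop, hw]

-- the head value does not survive dropWhile (== v) in a sorted tail
theorem pvNotMem_drop (v : Int) : ∀ (rest : List Int), rest.Pairwise (· ≤ ·) →
    (∀ x ∈ rest, v ≤ x) → v ∉ rest.dropWhile (fun x => x == v) := by
  intro rest
  induction rest with
  | nil => intro _ _ h; simp at h
  | cons a t ih =>
      intro hp hle
      by_cases ha : a = v
      · subst ha
        rw [List.dropWhile_cons_of_pos (by simp)]
        exact ih (List.pairwise_cons.1 hp).2 (fun x hx => hle x (List.mem_cons_of_mem _ hx))
      · rw [List.dropWhile_cons_of_neg (by simpa using ha)]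
        intro hmem
        rcases List.mem_cons.1 hmem with h1 | h2
        · exact ha h1.symm
        · have h3 : a ≤ v := (List.pairwise_cons.1 hp).1 v h2
          have h4 : v ≤ a := hle a List.mem_cons_self
          exact ha (le_antisymm h3 h4)

-- the takeWhile block is a replicate
theorem pvTake_repl (v : Int) (rest : List Int) :
    rest.takeWhile (fun x => x == v)
      = List.replicate (rest.takeWhile (fun x => x == v)).length v := by
  apply List.eq_replicate_of_mem
  intro b hb
  have := List.mem_takeWhile_imp hb
  simpa using this

-- for a sorted list the run scan finds a run of 5 iff some count is ≥ 5
theorem pvRun_main : ∀ (n : Nat) (l : List Int), l.length ≤ n → l.Pairwise (· ≤ ·) →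
    pvRunLoop l none 0 = if l.any (fun v => 5 ≤ l.count v) then 50 else 0 := by
  intro n
  induction n with
  | zero =>
      intro l hl _
      have : l = [] := List.eq_nil_of_length_eq_zero (Nat.le_zero.1 hl)
      subst this; rfl
  | succ n ih =>
      intro l hl hp
      cases l with
      | nil => rfl
      | cons v rest =>
        have hple : ∀ x ∈ rest, v ≤ x := (List.pairwise_cons.1 hp).1
        have hprest : rest.Pairwise (· ≤ ·) := (List.pairwise_cons.1 hp).2
        set l' := rest.dropWhile (fun x => x == v) with hl'def
        set k := (rest.takeWhile (fun x => x == v)).length with hkdef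
        have hsplit : rest = List.replicate k v ++ l' := by
          conv_lhs => rw [← List.takeWhile_append_dropWhile (p := fun x => x == v) (l := rest)]
          rw [← hl'def, hkdef, ← pvTake_repl]
        have hvnot : v ∉ l' := pvNotMem_drop v rest hprest hple
        have hsub : l'.Sublist rest := hl'def ▸ List.dropWhile_sublist _
        have hlen : l'.length ≤ n := by
          have := hsub.length_le
          simp only [List.length_cons] at hl
          omega
        have hpl' : l'.Pairwise (· ≤ ·) := hprest.sublist hsub
        -- counts in l = v :: replicate k v ++ l'
        have hcv : (v :: rest).count v = k + 1 := by
          rw [hsplit]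
          simp [List.count_append, List.count_replicate, List.count_eq_zero.2 hvnot]
        have hcx : ∀ x, x ≠ v → (v :: rest).count x = l'.count x := by
          intro x hx
          have hx' : v ≠ x := Ne.symm hx
          rw [hsplit]
          simp [List.count_append, List.count_replicate, hx']
        -- evaluate the scan
        have hstep : pvRunLoop (v :: rest) none 0 = pvRunLoop rest (some v) 1 := by
          simp [pvRunLoop]
        rw [hstep, hsplit, pvRun_consume k l' v 1 (by omega)]
        by_cases h5 : (5 : Int) ≤ 1 + (k : Int)
        · rw [if_pos h5]
          have : (v :: rest).any (fun x => 5 ≤ (v :: rest).count x) = true := by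
            refine List.any_eq_true.2 ⟨v, List.mem_cons_self, ?_⟩
            simp only [decide_eq_true_eq, hcv]
            omega
          rw [hsplit] at this
          rw [if_pos this]
        · rw [if_neg h5, pvRun_reset l' v _ hvnot, ih l' hlen hpl']
          have hiff : (v :: rest).any (fun x => 5 ≤ (v :: rest).count x)
              = l'.any (fun x => 5 ≤ l'.count x) := by
            rw [Bool.eq_iff_iff]
            simp only [List.any_eq_true, decide_eq_true_eq]
            constructor
            · rintro ⟨x, hx, hc⟩
              by_cases hxv : x = v
              · subst hxv
                rw [hcv] at hc
                omega
              · refine ⟨x, ?_, by rwa [hcx x hxv] at hc⟩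
                rcases List.mem_cons.1 hx with h1 | h2
                · exact absurd h1 hxv
                · rw [hsplit] at h2
                  rcases List.mem_append.1 h2 with h3 | h4
                  · exact absurd (List.eq_of_mem_replicate h3) hxv
                  · exact h4
            · rintro ⟨x, hx, hc⟩
              have hxv : x ≠ v := fun e => hvnot (e ▸ hx)
              refine ⟨x, ?_, by rwa [hcx x hxv]⟩
              exact List.mem_cons_of_mem _ (hsplit ▸ List.mem_append_right _ hx)
          rw [hsplit] at hiff
          rw [hiff]

-- B computes the same characterisation
theorem pvB_eq (dados : List Int) :
    calcula_pontos_quina_alt dados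
      = if dados.any (fun v => 5 ≤ dados.count v) then 50 else 0 := by
  unfold calcula_pontos_quina_alt
  have hperm : (PySem.List.sorted dados (fun x => x) false).Perm dados :=
    PySem.List.sorted_perm dados (fun x => x) false
  have hpw : (PySem.List.sorted dados (fun x => x) false).Pairwise (· ≤ ·) := by
    simpa using PySem.List.sorted_pairwise (xs := dados) (key := fun x => x)
  rw [pvRun_main (PySem.List.sorted dados (fun x => x) false).length _ le_rfl hpw]
  have hany : (PySem.List.sorted dados (fun x => x) false).any
        (fun v => 5 ≤ (PySem.List.sorted dados (fun x => x) false).count v)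
      = dados.any (fun v => 5 ≤ dados.count v) := by
    rw [Bool.eq_iff_iff]
    simp only [List.any_eq_true, decide_eq_true_eq]
    constructor
    · rintro ⟨x, hx, hc⟩
      exact ⟨x, hperm.mem_iff.1 hx, by rwa [hperm.count_eq] at hc⟩
    · rintro ⟨x, hx, hc⟩
      exact ⟨x, hperm.mem_iff.2 hx, by rwa [hperm.count_eq]⟩
  rw [hany]

-- ===== VERDICT (by name: the statement is the Claim_ definition above) =====
theorem calcula_pontos_quina_spec : Claim_equal_calcula_pontos_quina := by
  intro dados _
  unfold Spec_calcula_pontos_quina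
  rw [pvA_eq, pvB_eq]
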